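-- pv_equiv track=rewrite | github.com/GreyStoneXX/telegram-bot | services.py | dividir_respuesta
-- ===== SOURCE A (Python) =====
-- def dividir_respuesta(texto, limite=4096):
--     """Divide la respuesta en partes más pequeñas para enviarlas por Telegram si excede el límite de caracteres."""
--     partes = []
--     while len(texto) > limite:
--         corte = texto.rfind(" ", 0, limite)  # Intenta cortar en el último espacio antes del límite
--         if corte == -1:
--             corte = limite  # Si no hay espacios, corta exactamente en el límite
--         partes.append(texto[:corte])
--         texto = texto[corte:].strip()
--     partes.append(texto)
--     return partes
-- ===== SOURCE B (Python) =====
-- def dividir_respuesta(texto, limite=4096):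
--     """Divide la respuesta en partes para Telegram: un solo paso con punteros
--     (i, e) sobre el texto original, sin re-cortar la cola en cada vuelta."""
--     partes = []
--     i, e = 0, len(texto)
--     while e - i > limite:
--         j = texto.rfind(" ", i, i + limite)
--         corte = i + limite if j == -1 else j
--         partes.append(texto[i:corte])
--         i = corte
--         while i < e and texto[i].isspace():
--             i += 1
--         while e > i and texto[e - 1].isspace():
--             e -= 1
--     partes.append(texto[i:e])
--     return partes
-- ===== Notes on version B (the rewrite author's own statement) =====
-- stated objective: alternative
-- what changed: Instead of repeatedly re-slicing and stripping the remaining tail of the string each iteration, B keeps a pair of index pointers (i, e) into the original string, advances i past the cut and any whitespace, and only copies each emitted chunk once.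
-- outside the precondition, e.g. on dividir_respuesta('', 0): A returns [''], B returns ['']
import Mathlib
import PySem

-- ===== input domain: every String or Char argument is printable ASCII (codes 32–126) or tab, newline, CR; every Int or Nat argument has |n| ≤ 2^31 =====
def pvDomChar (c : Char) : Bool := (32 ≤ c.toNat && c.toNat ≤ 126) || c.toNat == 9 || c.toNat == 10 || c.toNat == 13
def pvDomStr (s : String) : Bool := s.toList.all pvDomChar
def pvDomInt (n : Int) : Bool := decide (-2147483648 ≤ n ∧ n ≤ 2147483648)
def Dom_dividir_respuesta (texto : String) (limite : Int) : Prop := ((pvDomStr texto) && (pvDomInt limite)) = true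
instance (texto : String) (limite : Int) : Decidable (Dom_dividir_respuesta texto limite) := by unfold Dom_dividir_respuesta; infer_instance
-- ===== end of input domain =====

-- B replaces A's per-iteration tail re-slicing/stripping by two index pointers into
-- the original string, copying each emitted chunk only once.

-- ===== PORT A =====
-- A's while loop as fuel recursion; under Pre_ (limite ≥ 1) each iteration shortens
-- texto by at least one character, so fuel length+1 is never exhausted.
def dividirGo (fuel : Nat) (texto : List Char) (limite : Int) : List (List Char) :=
  match fuel with
  | 0 => [texto]
  | fuel + 1 =>
    if limite < (texto.length : Int) then
      -- corte = texto.rfind(" ", 0, limite); if corte == -1: corte = limite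
      let corte0 := PySem.Chars.rfindFrom texto [' '] 0 (some limite)
      let corte := if corte0 = -1 then limite else corte0
      -- partes.append(texto[:corte]); texto = texto[corte:].strip()
      PySem.List.slice texto none (some corte) ::
        dividirGo fuel (PySem.Chars.strip (PySem.List.slice texto (some corte) none)) limite
    else [texto]

def dividir_respuesta (texto : String) (limite : Int) : List String :=
  (dividirGo (texto.toList.length + 1) texto.toList limite).map String.mk

-- ===== PORT B =====
-- while i < e and texto[i].isspace(): i += 1   (index i is in range, so getD's default is never used)
def skipFwd (texto : List Char) (i e : Nat) : Nat :=
  if i < e ∧ PySem.Chars.isspace (texto.getD i ' ') then skipFwd texto (i + 1) e else i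
termination_by e - i

-- while e > i and texto[e-1].isspace(): e -= 1
def skipBack (texto : List Char) (i e : Nat) : Nat :=
  if i < e ∧ PySem.Chars.isspace (texto.getD (e - 1) ' ') then skipBack texto i (e - 1) else e
termination_by e - i

def altGo (fuel : Nat) (texto : List Char) (i e : Nat) (limite : Int) : List (List Char) :=
  match fuel with
  | 0 => [PySem.List.slice texto (some (i : Int)) (some (e : Int))]
  | fuel + 1 =>
    if limite < (e : Int) - (i : Int) then
      -- j = texto.rfind(" ", i, i + limite); corte = i + limite if j == -1 else j
      let j := PySem.Chars.rfindFrom texto [' '] (i : Int) (some ((i : Int) + limite))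
      let corte : Int := if j = -1 then (i : Int) + limite else j
      -- partes.append(texto[i:corte]); i = corte; skip whitespace at both ends
      -- (under Pre_ corte ≥ 0, so corte.toNat is exact)
      let i' := skipFwd texto corte.toNat e
      let e' := skipBack texto i' e
      PySem.List.slice texto (some (i : Int)) (some corte) :: altGo fuel texto i' e' limite
    else [PySem.List.slice texto (some (i : Int)) (some (e : Int))]

def dividir_respuesta_alt (texto : String) (limite : Int) : List String :=
  (altGo (texto.toList.length + 1) texto.toList 0 texto.toList.length limite).map String.mk

-- ===== PRECONDITION & SPEC =====
-- Pre_ excludes limite ≤ 0: there A's while loop makes no progress and diverges on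
-- almost every texto; on the few such inputs where A does return (whitespace-only or
-- empty texto) B returns the same value anyway.
def Pre_dividir_respuesta (texto : String) (limite : Int) : Prop := 1 ≤ limite
instance (texto : String) (limite : Int) : Decidable (Pre_dividir_respuesta texto limite) := by
  unfold Pre_dividir_respuesta; infer_instance

def pvWitness_dividir_respuesta : String × Int := ("hola mundo que tal", 5)

def Spec_dividir_respuesta (texto : String) (limite : Int) (out : List String) : Prop :=
  out = dividir_respuesta_alt texto limite
instance (texto : String) (limite : Int) (out : List String) : Decidable (Spec_dividir_respuesta texto limite out) := by
  unfold Spec_dividir_respuesta; infer_instance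

-- ===== CLAIM (what is proved, stated in full; the proofs are below) =====
def Claim_equal_dividir_respuesta : Prop := ∀ (texto : String) (limite : Int),
  Dom_dividir_respuesta texto limite → Pre_dividir_respuesta texto limite →
  Spec_dividir_respuesta texto limite (dividir_respuesta texto limite)

-- ===== LEMMAS AND PROOFS =====

-- the segment texto[i:e] (i ≤ e ≤ len)
def pvSeg (l : List Char) (i e : Nat) : List Char := (l.drop i).take (e - i)

theorem pvSeg_length (l : List Char) (i e : Nat) (hi : i ≤ e) (he : e ≤ l.length) :
    (pvSeg l i e).length = e - i := by
  simp [pvSeg]; omega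

theorem pvSeg_cons (l : List Char) (i e : Nat) (hi : i < e) (he : e ≤ l.length) :
    pvSeg l i e = l.getD i ' ' :: pvSeg l (i + 1) e := by
  have hilen : i < l.length := by omega
  have h1 : l.drop i = l[i] :: l.drop (i + 1) := List.drop_eq_getElem_cons hilen
  have h2 : e - i = (e - (i + 1)) + 1 := by omega
  rw [pvSeg, h1, h2, List.take_succ_cons, List.getD, ← pvSeg]
  simp [List.getElem?_eq_getElem hilen]

theorem pvSeg_snoc (l : List Char) (i e : Nat) (hi : i < e) (he : e ≤ l.length) :
    pvSeg l i e = pvSeg l i (e - 1) ++ [l.getD (e - 1) ' '] := by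
  have h2 : e - i = (e - 1 - i) + 1 := by omega
  have hlt : i + (e - 1 - i) < l.length := by omega
  rw [pvSeg, h2, List.take_add_one, pvSeg]
  simp [List.getElem?_drop, List.getElem?_eq_getElem hlt]
  rw [List.getElem?_eq_getElem (by omega : e - 1 < l.length)]
  simp
  congr 1
  omega

theorem pvSeg_take (l : List Char) (i e k : Nat) (hk : k ≤ e - i) :
    (pvSeg l i e).take k = pvSeg l i (i + k) := by
  rw [pvSeg, pvSeg, List.take_take]
  congr 1
  omega

theorem pvSeg_drop (l : List Char) (i e k : Nat) :
    (pvSeg l i e).drop k = pvSeg l (i + k) e := by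
  rw [pvSeg, pvSeg, List.drop_take, List.drop_drop]
  congr 1
  omega

-- rfind.go basic facts
theorem rfind_go_zero (s sub : List Char) :
    PySem.Chars.rfind.go s sub 0 = if sub.isPrefixOf s then 0 else -1 := by
  unfold PySem.Chars.rfind.go; rfl

theorem rfind_go_succ (s sub : List Char) (j : Nat) :
    PySem.Chars.rfind.go s sub (j + 1) =
      if sub.isPrefixOf (s.drop (j + 1)) then ((j + 1 : Nat) : Int) else PySem.Chars.rfind.go s sub j := by
  conv_lhs => unfold PySem.Chars.rfind.go

theorem rfind_go_neg_one_le (s sub : List Char) (j : Nat) : -1 ≤ PySem.Chars.rfind.go s sub j := by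
  induction j with
  | zero => rw [rfind_go_zero]; split <;> simp
  | succ j ih =>
    rw [rfind_go_succ]; split
    · omega
    · exact ih

theorem rfind_go_le (s sub : List Char) (j : Nat) : PySem.Chars.rfind.go s sub j ≤ (j : Int) := by
  induction j with
  | zero => rw [rfind_go_zero]; split <;> simp
  | succ j ih =>
    rw [rfind_go_succ]; split
    · omega
    · omega

theorem rfind_go_prefix (s sub : List Char) (j : Nat)
    (h : 0 ≤ PySem.Chars.rfind.go s sub j) :
    sub.isPrefixOf (s.drop (PySem.Chars.rfind.go s sub j).toNat) = true := by
  induction j with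
  | zero =>
    rw [rfind_go_zero] at h ⊢
    split at h
    · simp_all
    · omega
  | succ j ih =>
    rw [rfind_go_succ] at h ⊢
    split at h
    · simp_all
    · rename_i hx
      rw [if_neg hx]
      exact ih h

theorem rfind_neg_one_le (s sub : List Char) : -1 ≤ PySem.Chars.rfind s sub := by
  unfold PySem.Chars.rfind; exact rfind_go_neg_one_le s sub s.length

theorem rfind_le_length (s sub : List Char) : PySem.Chars.rfind s sub ≤ (s.length : Int) := by
  unfold PySem.Chars.rfind; exact rfind_go_le s sub s.length

theorem rfind_prefix (s sub : List Char) (h : 0 ≤ PySem.Chars.rfind s sub) :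
    sub.isPrefixOf (s.drop (PySem.Chars.rfind s sub).toNat) = true := by
  unfold PySem.Chars.rfind at *; exact rfind_go_prefix s sub s.length h

-- skipFwd / skipBack bounds and their relation to lstrip / rstrip on segments
theorem skipFwd_bounds (l : List Char) (i e : Nat) (hi : i ≤ e) :
    i ≤ skipFwd l i e ∧ skipFwd l i e ≤ e := by
  fun_induction skipFwd with
  | case1 i h ih => have := ih (by omega); omega
  | case2 i h => omega

theorem skipBack_bounds (l : List Char) (i e : Nat) (hi : i ≤ e) :
    i ≤ skipBack l i e ∧ skipBack l i e ≤ e := by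
  fun_induction skipBack with
  | case1 e h ih => have := ih (by omega); omega
  | case2 e h => omega

theorem lstrip_pvSeg (l : List Char) (i e : Nat) (hi : i ≤ e) (he : e ≤ l.length) :
    List.dropWhile PySem.Chars.isspace (pvSeg l i e) = pvSeg l (skipFwd l i e) e := by
  fun_induction skipFwd with
  | case1 i h ih =>
    rw [pvSeg_cons l i e h.1 he, List.dropWhile_cons_of_pos h.2]
    exact ih (by omega)
  | case2 i h =>
    rcases Nat.lt_or_ge i e with hlt | hge
    · have hns : PySem.Chars.isspace (l.getD i ' ') = false := by
        by_contra hc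
        exact h ⟨hlt, by simpa using hc⟩
      rw [pvSeg_cons l i e hlt he, List.dropWhile_cons_of_neg (by simpa [List.getD] using hns),
        ← pvSeg_cons l i e hlt he]
    · have h0 : e - i = 0 := by omega
      simp [pvSeg, h0]

theorem rstrip_pvSeg (l : List Char) (i e : Nat) (hi : i ≤ e) (he : e ≤ l.length) :
    PySem.Chars.rstrip (pvSeg l i e) = pvSeg l i (skipBack l i e) := by
  fun_induction skipBack with
  | case1 e h ih =>
    rw [pvSeg_snoc l i e h.1 he, PySem.Chars.rstrip, List.reverse_append,
      List.reverse_singleton, List.singleton_append, List.dropWhile_cons_of_pos h.2,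
      ← PySem.Chars.rstrip]
    exact ih (by omega) (by omega)
  | case2 e h =>
    rcases Nat.lt_or_ge i e with hlt | hge
    · have hns : PySem.Chars.isspace (l.getD (e - 1) ' ') = false := by
        by_contra hc
        exact h ⟨hlt, by simpa using hc⟩
      rw [pvSeg_snoc l i e hlt he, PySem.Chars.rstrip, List.reverse_append,
        List.reverse_singleton, List.singleton_append,
        List.dropWhile_cons_of_neg (by simpa [List.getD] using hns)]
      simp only [List.reverse_cons, List.reverse_reverse]
    · have h0 : e - i = 0 := by omega
      simp [pvSeg, h0, PySem.Chars.rstrip]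

-- Main loop correspondence: A's loop on the segment texto[i:e] equals B's pointer loop.
theorem go_eq (n : Nat) : ∀ (fa fb i e : Nat) (l : List Char) (limite : Int),
    1 ≤ limite → i ≤ e → e ≤ l.length → e - i ≤ n → n < fa → n < fb →
    dividirGo fa (pvSeg l i e) limite = altGo fb l i e limite := by
  induction n with
  | zero =>
    intro fa fb i e l limite hlim hi he hn hfa hfb
    match fa, fb with
    | fa + 1, fb + 1 =>
      have hlen : ((pvSeg l i e).length : Int) = (e : Int) - (i : Int) := by
        rw [pvSeg_length l i e hi he]; omega
      have hcond : ¬ limite < (e : Int) - (i : Int) := by omega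
      simp only [dividirGo, altGo, hlen, if_neg hcond]
      rw [PySem.List.slice_natCast, pvSeg]
  | succ n ih =>
    intro fa fb i e l limite hlim hi he hn hfa hfb
    match fa, fb with
    | fa + 1, fb + 1 =>
      have hlen : ((pvSeg l i e).length : Int) = (e : Int) - (i : Int) := by
        rw [pvSeg_length l i e hi he]; omega
      by_cases hcond : limite < (e : Int) - (i : Int)
      · -- loop iteration
        have hlimnat : limite.toNat < e - i := by omega
        have hlim1 : 1 ≤ limite.toNat := by omega
        set w := pvSeg l i (i + limite.toNat) with hw
        have hwin : List.take limite.toNat (pvSeg l i e) = w := by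
          rw [hw, ← pvSeg_take l i e limite.toNat (by omega)]
        have hwinB : List.drop i (List.take (i + limite.toNat) l) = w := by
          rw [List.drop_take, hw, pvSeg]
        set r := PySem.Chars.rfind w [' '] with hr
        have hrlb : -1 ≤ r := rfind_neg_one_le w [' ']
        have hwl : (w.length : Int) = (limite.toNat : Int) := by
          rw [hw, pvSeg_length l i (i + limite.toNat) (by omega) (by omega)]
          omega
        have hrub : r ≤ (limite.toNat : Int) := by
          have := rfind_le_length w [' ']
          omega
        -- A's rfindFrom
        have hA : PySem.Chars.rfindFrom (pvSeg l i e) [' '] 0 (some limite)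
            = if r = -1 then -1 else r := by
          simp only [PySem.Chars.rfindFrom]
          rw [hlen]
          have c1 : ¬ ((e : Int) - (i : Int) < limite) := by omega
          have c2 : ¬ (limite < (0 : Int)) := by omega
          have c3 : ¬ ((0 : Int) < 0) := by omega
          simp only [if_neg c1, if_neg c2, if_neg c3, Int.toNat_zero, List.drop_zero,
            zero_add, hwin, ← hr]
        -- B's rfindFrom
        have hB : PySem.Chars.rfindFrom l [' '] (i : Int) (some ((i : Int) + limite))
            = if r = -1 then -1 else (i : Int) + r := by
          simp only [PySem.Chars.rfindFrom]
          have c1 : ¬ ((l.length : Int) < (i : Int) + limite) := by omega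
          have c2 : ¬ ((i : Int) + limite < 0) := by omega
          have c3 : ¬ ((i : Int) < 0) := by omega
          have c4 : ¬ ((i : Int) + limite < (i : Int)) := by omega
          have ht : ((i : Int) + limite).toNat = i + limite.toNat := by omega
          simp only [if_neg c1, if_neg c2, if_neg c3, if_neg c4, ht, Int.toNat_natCast,
            hwinB, ← hr]
        -- the two cut points
        set corteA : Int := if r = -1 then limite else r with hcA
        have hcA0 : 0 ≤ corteA := by rw [hcA]; split <;> omega
        have hcAub : corteA.toNat ≤ limite.toNat := by rw [hcA]; split <;> omega
        set cA := corteA.toNat with hcAn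
        have hcorteA : (if (if r = -1 then (-1 : Int) else r) = -1 then limite
            else (if r = -1 then (-1 : Int) else r)) = corteA := by
          rcases eq_or_ne r (-1) with h | h
          · simp [h, hcA]
          · rw [if_neg h, if_neg h, hcA, if_neg h]

        have hcorteB :
            (if (if r = -1 then (-1 : Int) else (i : Int) + r) = -1 then (i : Int) + limite
              else (if r = -1 then (-1 : Int) else (i : Int) + r)) = (i : Int) + corteA := by
          rcases eq_or_ne r (-1) with h | h
          · simp [h, hcA]
          · rw [if_neg h, if_neg (by omega : ¬ (i : Int) + r = -1), hcA, if_neg h]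
        -- chunk equality
        have hchunkA : PySem.List.slice (pvSeg l i e) none (some corteA)
            = pvSeg l i (i + cA) := by
          rw [PySem.List.slice_to _ hcA0, ← hcAn, pvSeg_take l i e cA (by omega)]
        have hchunkB : PySem.List.slice l (some (i : Int)) (some ((i : Int) + corteA))
            = pvSeg l i (i + cA) := by
          have hic : (i : Int) + corteA = ((i + cA : Nat) : Int) := by omega
          rw [hic, PySem.List.slice_natCast, pvSeg]
        -- the tail
        have htailA : PySem.List.slice (pvSeg l i e) (some corteA) none
            = pvSeg l (i + cA) e := by
          rw [PySem.List.slice_from _ hcA0, ← hcAn, pvSeg_drop]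
        set i' := skipFwd l (i + cA) e with hi'
        set e' := skipBack l i' e with he'
        have hi'b := skipFwd_bounds l (i + cA) e (by omega)
        have he'b := skipBack_bounds l i' e (by omega)
        have hstrip : PySem.Chars.strip (pvSeg l (i + cA) e) = pvSeg l i' e' := by
          rw [PySem.Chars.strip, PySem.Chars.lstrip,
            lstrip_pvSeg l (i + cA) e (by omega) he, ← hi',
            rstrip_pvSeg l i' e (by omega) he, ← he']
        -- progress: e' - i' < e - i
        have hprog : e' - i' < e - i := by
          rcases Nat.eq_zero_or_pos cA with hc0 | hcpos
          · -- cA = 0: r = 0 and l[i] is a space, so skipFwd advances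
            have hr0 : r = 0 := by
              rw [hcAn, hcA] at hc0
              rcases eq_or_ne r (-1) with h | h
              · rw [if_pos h] at hc0; omega
              · rw [if_neg h] at hc0; omega
            have hpre := rfind_prefix w [' '] (by omega)
            rw [← hr, hr0] at hpre
            simp only [Int.toNat_zero, List.drop_zero] at hpre
            have hwc : w = l.getD i ' ' :: pvSeg l (i + 1) (i + limite.toNat) := by
              rw [hw]; exact pvSeg_cons l i (i + limite.toNat) (by omega) (by omega)
            rw [hwc] at hpre
            have hsp0 : (' ' : Char) = l[i]?.getD ' ' := by
              simpa [List.isPrefixOf] using hpre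
            have hsp : l.getD i ' ' = ' ' := by
              simp only [List.getD]; exact hsp0.symm
            have hstep : skipFwd l (i + cA) e = skipFwd l (i + cA + 1) e := by
              rw [skipFwd, if_pos ⟨by omega, by rw [hc0, Nat.add_zero, hsp]; decide⟩]
            have h2 := skipFwd_bounds l (i + cA + 1) e (by omega)
            rw [hstep] at hi'
            omega
          · omega
        -- unfold one step of both loops
        have hind := ih fa fb i' e' l limite hlim (by omega) (by omega) (by omega)
          (by omega) (by omega)
        simp only [dividirGo, altGo, hlen, if_pos hcond]
        rw [hA, hB, hcorteA, hcorteB, hchunkA, hchunkB, htailA, hstrip]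
        rw [show ((i : Int) + corteA).toNat = i + cA by omega, ← hi', ← he']
        rw [hind]
      · simp only [dividirGo, altGo, hlen, if_neg hcond]
        rw [PySem.List.slice_natCast, pvSeg]

-- ===== VERDICT (by name: the statement is the Claim_ definition above) =====
theorem dividir_respuesta_spec : Claim_equal_dividir_respuesta := by
  intro texto limite _hdom hpre
  unfold Spec_dividir_respuesta dividir_respuesta dividir_respuesta_alt
  have hseg : pvSeg texto.toList 0 texto.toList.length = texto.toList := by
    simp [pvSeg]
  have h := go_eq texto.toList.length (texto.toList.length + 1) (texto.toList.length + 1)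
    0 texto.toList.length texto.toList limite hpre (by omega) (by omega) (by omega)
    (by omega) (by omega)
  rw [hseg] at h
  rw [h]
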